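-- pv_equiv track=rewrite | github.com/prashgarg/frontiergraph | scripts/analyze_paper_graph_motifs.py | any_parallel_mediator
-- ===== SOURCE A (Python) =====
-- def any_parallel_mediator(out_map: dict[str, set[str]]) -> bool:
--     for src, mids in out_map.items():
--         mids = [m for m in mids if m != src]
--         if len(mids) < 2:
--             continue
--         target_counts: dict[str, int] = {}
--         for mid in mids:
--             for dst in out_map[mid]:
--                 if dst in {src, mid}:
--                     continue
--                 target_counts[dst] = target_counts.get(dst, 0) + 1
--                 if target_counts[dst] >= 2:
--                     return True
--     return False
-- ===== SOURCE B (Python) =====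
-- def any_parallel_mediator(out_map: dict[str, set[str]]) -> bool:
--     for src, tgts in out_map.items():
--         rest = [m for m in tgts if m != src]
--         while len(rest) >= 2:
--             m1, rest = rest[0], rest[1:]
--             t1 = {d for d in out_map[m1] if d != src and d != m1}
--             for m2 in rest:
--                 t2 = {d for d in out_map[m2] if d != src and d != m2}
--                 if t1 & t2:
--                     return True
--     return False
-- ===== Notes on version B (the rewrite author's own statement) =====
-- stated objective: alternative
-- what changed: B drops A's per-edge target_counts dict entirely and instead tests every pair of mediators of a source directly: it builds each mediator's filtered target set and returns True when the two sets of any pair intersect (quadratic pairwise comparison instead of single-pass occurrence counting).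
-- outside the precondition, e.g. on any_parallel_mediator({'a': {'c', 'b'}, 'b': {'x'}}): A raises KeyError, B raises KeyError
import Mathlib
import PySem

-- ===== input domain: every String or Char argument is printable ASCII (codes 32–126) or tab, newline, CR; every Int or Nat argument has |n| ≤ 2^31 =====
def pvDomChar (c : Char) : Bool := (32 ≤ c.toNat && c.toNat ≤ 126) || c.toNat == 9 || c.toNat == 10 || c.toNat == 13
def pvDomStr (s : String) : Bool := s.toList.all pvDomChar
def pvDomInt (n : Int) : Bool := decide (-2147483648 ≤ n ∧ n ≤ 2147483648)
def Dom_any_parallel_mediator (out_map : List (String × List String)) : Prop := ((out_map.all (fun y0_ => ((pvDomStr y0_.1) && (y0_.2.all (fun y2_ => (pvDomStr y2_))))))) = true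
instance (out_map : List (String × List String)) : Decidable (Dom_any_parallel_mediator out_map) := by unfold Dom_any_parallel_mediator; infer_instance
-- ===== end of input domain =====

-- B replaces A's per-edge counting dict by a direct pairwise test: for each source it
-- intersects the filtered target sets of every pair of mediators (objective: alternative).

-- ===== PORT A =====
-- the value out_map[mid]; Pre_ guarantees mid is a key wherever A dereferences it,
-- so the [] default is never used on admitted inputs
def pvAVal (out_map : List (String × List String)) (mid : String) : List String :=
  ((PySem.Dict.mk out_map).get? mid).getD []

-- inner 'for dst in out_map[mid]' loop of A, threading target_counts
def pvA_dsts (src mid : String) (dsts : List String) (counts : PySem.Dict String Int) :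
    Bool × PySem.Dict String Int :=
  match dsts with
  | [] => (false, counts)
  | dst :: rest =>
    if dst == src || dst == mid then pvA_dsts src mid rest counts
    else
      let c := counts.getD dst 0 + 1
      let counts' := counts.insert dst c
      if 2 ≤ c then (true, counts')
      else pvA_dsts src mid rest counts'

-- 'for mid in mids' loop of A
def pvA_mids (out_map : List (String × List String)) (src : String)
    (mids : List String) (counts : PySem.Dict String Int) : Bool :=
  match mids with
  | [] => false
  | mid :: rest =>
    let r := pvA_dsts src mid (pvAVal out_map mid) counts
    if r.1 then true else pvA_mids out_map src rest r.2

-- 'for src, mids in out_map.items()' loop of A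
def pvA_items (out_map : List (String × List String))
    (items : List (String × List String)) : Bool :=
  match items with
  | [] => false
  | (src, tgts) :: rest =>
    let mids := tgts.filter (fun m => m != src)
    if mids.length < 2 then pvA_items out_map rest
    else if pvA_mids out_map src mids PySem.Dict.empty then true
    else pvA_items out_map rest

def any_parallel_mediator (out_map : List (String × List String)) : Bool :=
  pvA_items out_map out_map

-- ===== PORT B =====
-- t = {d for d in out_map[m] if d != src and d != m}
def pvBtgt (out_map : List (String × List String)) (src m : String) : PySem.Set String :=
  PySem.Set.ofList ((((PySem.Dict.mk out_map).get? m).getD []).filter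
    (fun d => d != src && d != m))

-- B's 'while len(rest) >= 2: m1, rest = rest[0], rest[1:]; for m2 in rest: …' loop
def pvB_pairs (out_map : List (String × List String)) (src : String) :
    List String → Bool
  | [] => false
  | [_] => false
  | m1 :: rest =>
    let t1 := pvBtgt out_map src m1
    if rest.any (fun m2 => !(PySem.Set.inter t1 (pvBtgt out_map src m2)).isEmpty) then
      true
    else pvB_pairs out_map src rest

def any_parallel_mediator_alt (out_map : List (String × List String)) : Bool :=
  out_map.any (fun p => pvB_pairs out_map p.1 (p.2.filter (fun m => m != p.1)))

-- ===== PRECONDITION & SPEC =====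
-- Pre_ excludes assoc lists that are not a faithful dict[str, set[str]] (duplicate keys,
-- or a duplicate inside a value list) and inputs where some dereferenced mediator of a
-- qualifying source is not a key: there A's raising-vs-returning depends on the
-- unspecified set/dict iteration order (A may return True before hitting the KeyError).
def Pre_any_parallel_mediator (out_map : List (String × List String)) : Prop :=
  (out_map.map Prod.fst).Nodup ∧
  (∀ p ∈ out_map, p.2.Nodup) ∧
  (∀ p ∈ out_map, 2 ≤ (p.2.filter (fun m => m != p.1)).length →
    ∀ m ∈ p.2.filter (fun m => m != p.1), m ∈ out_map.map Prod.fst)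
instance (out_map : List (String × List String)) : Decidable (Pre_any_parallel_mediator out_map) := by
  unfold Pre_any_parallel_mediator; infer_instance

def pvWitness_any_parallel_mediator : (List (String × List String)) :=
  [("a", ["b", "c"]), ("b", ["c"]), ("c", [])]

def Spec_any_parallel_mediator (out_map : List (String × List String)) (out : Bool) : Prop := out = any_parallel_mediator_alt out_map
instance (out_map : List (String × List String)) (out : Bool) : Decidable (Spec_any_parallel_mediator out_map out) := by unfold Spec_any_parallel_mediator; infer_instance

-- ===== CLAIM (what is proved, stated in full; the proofs are below) =====
def Claim_equal_any_parallel_mediator : Prop := ∀ (out_map : List (String × List String)), Dom_any_parallel_mediator out_map → Pre_any_parallel_mediator out_map → Spec_any_parallel_mediator out_map (any_parallel_mediator out_map)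

-- ===== LEMMAS AND PROOFS =====

-- proof-only bridge state machine: A's counting loop, re-read as a 'seen' set
def pvSeen (out_map : List (String × List String)) (src : String)
    (mids : List String) (seen : PySem.Set String) : Bool :=
  match mids with
  | [] => false
  | mid :: rest =>
    let tgt : PySem.Set String :=
      PySem.Set.diff (((PySem.Dict.mk out_map).get? mid).getD []) [src, mid]
    if (PySem.Set.inter seen tgt).isEmpty then
      pvSeen out_map src rest (PySem.Set.update seen tgt)
    else true

-- filtered target set of a mediator (proof-only, as a diff like A's membership test)
def pvFilt (out_map : List (String × List String)) (src m : String) : PySem.Set String :=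
  PySem.Set.diff (pvAVal out_map m) [src, m]

-- 'some pair of mediators shares a filtered target', recursively
def pvPairProp (out_map : List (String × List String)) (src : String) :
    List String → Prop
  | [] => False
  | m :: rest =>
    (∃ m' ∈ rest, ∃ d, d ∈ pvFilt out_map src m ∧ d ∈ pvFilt out_map src m') ∨
      pvPairProp out_map src rest

-- A's dst loop: it hits iff some kept dst already has count ≥ 1; on no hit, each kept
-- dst's count grew by exactly 1 and the others are unchanged.
theorem pvA_dsts_spec (src mid : String) (dsts : List String)
    (counts : PySem.Dict String Int)
    (hnd : (dsts.filter (fun d => !(d == src || d == mid))).Nodup)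
    (hnn : ∀ d, 0 ≤ counts.getD d 0) :
    ((pvA_dsts src mid dsts counts).1 =
      (dsts.filter (fun d => !(d == src || d == mid))).any
        (fun d => decide (1 ≤ counts.getD d 0)))
    ∧ ((pvA_dsts src mid dsts counts).1 = false →
        ∀ d, (pvA_dsts src mid dsts counts).2.getD d 0 =
          counts.getD d 0 +
            (if d ∈ dsts.filter (fun d => !(d == src || d == mid)) then 1 else 0)) := by
  induction dsts generalizing counts with
  | nil => simp [pvA_dsts]
  | cons dst rest ih =>
    by_cases hskip : (dst == src || dst == mid) = true
    · have h1 : (dst :: rest).filter (fun d => !(d == src || d == mid)) =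
          rest.filter (fun d => !(d == src || d == mid)) := by
        simp only [List.filter_cons, hskip, Bool.not_true]
        simp
      rw [h1] at hnd ⊢
      simpa [pvA_dsts, hskip] using ih counts hnd hnn
    · have hp : (dst == src || dst == mid) = false := by
        revert hskip; cases (dst == src || dst == mid) <;> simp
      have h1 : (dst :: rest).filter (fun d => !(d == src || d == mid)) =
          dst :: rest.filter (fun d => !(d == src || d == mid)) := by
        simp only [List.filter_cons, hp, Bool.not_false]
        simp
      rw [h1] at hnd ⊢
      have hdst : dst ∉ rest.filter (fun d => !(d == src || d == mid)) :=
        (List.nodup_cons.mp hnd).1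
      have hrest : (rest.filter (fun d => !(d == src || d == mid))).Nodup :=
        (List.nodup_cons.mp hnd).2
      by_cases hge : 2 ≤ counts.getD dst 0 + 1
      · have hone : (1 : Int) ≤ counts.getD dst 0 := by omega
        constructor
        · simp [pvA_dsts, hp, hge, hone]
        · intro hfalse
          exfalso
          simp [pvA_dsts, hp, hge] at hfalse
      · have hzero : counts.getD dst 0 = 0 := le_antisymm (by omega) (hnn dst)
        have hnn' : ∀ d, 0 ≤ (counts.insert dst (counts.getD dst 0 + 1)).getD d 0 := by
          intro d
          rw [PySem.Dict.getD_insert]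
          split
          · omega
          · exact hnn d
        obtain ⟨ih1, ih2⟩ := ih (counts.insert dst (counts.getD dst 0 + 1)) hrest hnn'
        have hagree : ∀ d ∈ rest.filter (fun d => !(d == src || d == mid)),
            (counts.insert dst (counts.getD dst 0 + 1)).getD d 0 = counts.getD d 0 := by
          intro d hd
          rw [PySem.Dict.getD_insert]
          split
          · rename_i hdeq; exact absurd (hdeq ▸ hd) hdst
          · rfl
        have hstep1 : (pvA_dsts src mid (dst :: rest) counts).1 =
            (pvA_dsts src mid rest (counts.insert dst (counts.getD dst 0 + 1))).1 := by
          simp [pvA_dsts, hp, hge]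
        have hstep2 : (pvA_dsts src mid (dst :: rest) counts).2 =
            (pvA_dsts src mid rest (counts.insert dst (counts.getD dst 0 + 1))).2 := by
          simp [pvA_dsts, hp, hge]
        constructor
        · rw [hstep1, ih1]
          simp only [List.any_cons]
          have hfd : decide (1 ≤ counts.getD dst 0) = false := by simp [hzero]
          rw [hfd, Bool.false_or]
          rw [Bool.eq_iff_iff]
          simp only [List.any_eq_true]
          constructor
          · rintro ⟨d, hd, hdc⟩
            exact ⟨d, hd, by rwa [hagree d hd] at hdc⟩
          · rintro ⟨d, hd, hdc⟩
            exact ⟨d, hd, by rwa [hagree d hd]⟩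
        · intro hfalse d
          have hfalse' : (pvA_dsts src mid rest
              (counts.insert dst (counts.getD dst 0 + 1))).1 = false := by
            rwa [hstep1] at hfalse
          rw [hstep2, ih2 hfalse' d, PySem.Dict.getD_insert]
          by_cases hdd : d = dst
          · subst hdd
            rw [if_pos rfl, if_neg hdst, if_pos List.mem_cons_self]
            omega
          · rw [if_neg hdd]
            by_cases hdm : d ∈ rest.filter (fun d => !(d == src || d == mid))
            · rw [if_pos hdm, if_pos (List.mem_cons_of_mem _ hdm)]
            · rw [if_neg hdm, if_neg (fun h => (List.mem_cons.mp h).elim hdd hdm)]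

-- every value list of a Pre_-respecting map is duplicate-free (it models a Python set)
theorem pvAVal_nodup (out_map : List (String × List String))
    (hv : ∀ p ∈ out_map, p.2.Nodup) (mid : String) : (pvAVal out_map mid).Nodup := by
  induction out_map with
  | nil =>
    unfold pvAVal
    simp [PySem.Dict.get?]
  | cons q rest ih =>
    obtain ⟨k, v⟩ := q
    unfold pvAVal
    rw [PySem.Dict.get?_mk_cons]
    by_cases hk : (k == mid) = true
    · rw [if_pos hk]
      exact hv (k, v) (List.mem_cons_self)
    · rw [if_neg hk]
      exact ih (fun p hp => hv p (List.mem_cons_of_mem _ hp))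

-- one-step unfoldings of the two per-source loops
theorem hAeq (out_map : List (String × List String)) (src mid : String)
    (rest : List String) (counts : PySem.Dict String Int) :
    pvA_mids out_map src (mid :: rest) counts =
      if (pvA_dsts src mid (pvAVal out_map mid) counts).1 then true
      else pvA_mids out_map src rest (pvA_dsts src mid (pvAVal out_map mid) counts).2 := rfl

theorem hSeq (out_map : List (String × List String)) (src mid : String)
    (rest : List String) (seen : PySem.Set String) :
    pvSeen out_map src (mid :: rest) seen =
      if (PySem.Set.inter seen (pvFilt out_map src mid)).isEmpty then
        pvSeen out_map src rest (PySem.Set.update seen (pvFilt out_map src mid))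
      else true := rfl

-- A's per-source loop equals the bridge: counts ≥ 1 exactly on the members of 'seen'
theorem pvA_mids_eq_seen (out_map : List (String × List String)) (src : String)
    (mids : List String) (counts : PySem.Dict String Int) (seen : PySem.Set String)
    (hv : ∀ p ∈ out_map, p.2.Nodup)
    (hinv : ∀ d, 1 ≤ counts.getD d 0 ↔ d ∈ seen)
    (hnn : ∀ d, 0 ≤ counts.getD d 0) :
    pvA_mids out_map src mids counts = pvSeen out_map src mids seen := by
  induction mids generalizing counts seen with
  | nil => rfl
  | cons mid rest ih =>
    have hvnd : (pvAVal out_map mid).Nodup := pvAVal_nodup out_map hv mid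
    have hfnd : ((pvAVal out_map mid).filter (fun d => !(d == src || d == mid))).Nodup :=
      hvnd.filter _
    obtain ⟨h1, h2⟩ := pvA_dsts_spec src mid (pvAVal out_map mid) counts hfnd hnn
    have hmemtgt : ∀ d, d ∈ pvFilt out_map src mid ↔
        d ∈ (pvAVal out_map mid).filter (fun x => !(x == src || x == mid)) := by
      intro d
      rw [pvFilt, PySem.Set.mem_diff]
      simp [List.mem_filter, not_or]
    have hhit : (pvA_dsts src mid (pvAVal out_map mid) counts).1 =
        !(PySem.Set.inter seen (pvFilt out_map src mid)).isEmpty := by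
      rw [h1, Bool.eq_iff_iff, List.any_eq_true, Bool.not_eq_true', List.isEmpty_eq_false_iff]
      constructor
      · rintro ⟨d, hd, hdc⟩
        have hdc' : 1 ≤ counts.getD d 0 := of_decide_eq_true hdc
        have hmem : d ∈ PySem.Set.inter seen (pvFilt out_map src mid) := by
          rw [PySem.Set.mem_inter]
          exact ⟨(hinv d).mp hdc', (hmemtgt d).mpr hd⟩
        intro hnil
        rw [hnil] at hmem
        simp at hmem
      · intro hne
        obtain ⟨d, hd⟩ := List.exists_mem_of_ne_nil _ hne
        rw [PySem.Set.mem_inter] at hd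
        exact ⟨d, (hmemtgt d).mp hd.2, decide_eq_true ((hinv d).mpr hd.1)⟩
    by_cases hb : (PySem.Set.inter seen (pvFilt out_map src mid)).isEmpty = true
    · -- no hit: both recurse; re-establish the invariant on the new state
      have hA1 : (pvA_dsts src mid (pvAVal out_map mid) counts).1 = false := by
        rw [hhit, hb]; rfl
      have hinv' : ∀ d, 1 ≤ (pvA_dsts src mid (pvAVal out_map mid) counts).2.getD d 0 ↔
          d ∈ PySem.Set.update seen (pvFilt out_map src mid) := by
        intro d
        rw [h2 hA1 d, PySem.Set.mem_update, hmemtgt d]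
        by_cases hdm : d ∈ (pvAVal out_map mid).filter (fun x => !(x == src || x == mid))
        · rw [if_pos hdm]
          have := hnn d
          exact ⟨fun _ => Or.inr hdm, fun _ => by omega⟩
        · rw [if_neg hdm, add_zero, hinv d]
          exact ⟨Or.inl, fun h => h.resolve_right hdm⟩
      have hnn' : ∀ d, 0 ≤ (pvA_dsts src mid (pvAVal out_map mid) counts).2.getD d 0 := by
        intro d
        rw [h2 hA1 d]
        have := hnn d
        split <;> omega
      have hrec := ih (pvA_dsts src mid (pvAVal out_map mid) counts).2
        (PySem.Set.update seen (pvFilt out_map src mid)) hinv' hnn'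
      rw [hAeq out_map src mid rest counts, hSeq out_map src mid rest seen,
        if_neg (by rw [hA1]; exact Bool.false_ne_true), if_pos hb]
      exact hrec
    · -- hit: both return true
      have hbf : (PySem.Set.inter seen (pvFilt out_map src mid)).isEmpty = false := by
        revert hb
        cases (PySem.Set.inter seen (pvFilt out_map src mid)).isEmpty <;> simp
      have hA1 : (pvA_dsts src mid (pvAVal out_map mid) counts).1 = true := by
        rw [hhit, hbf]; rfl
      rw [hAeq out_map src mid rest counts, hSeq out_map src mid rest seen,
        if_pos hA1, if_neg hb]

-- membership in B's filtered target set = membership in the bridge's pvFilt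
theorem mem_pvBtgt (out_map : List (String × List String)) (src m d : String) :
    d ∈ pvBtgt out_map src m ↔ d ∈ pvFilt out_map src m := by
  rw [pvBtgt, pvFilt, pvAVal, PySem.Set.mem_ofList, PySem.Set.mem_diff, List.mem_filter]
  simp [not_or]

-- B's per-source pairwise loop decides pvPairProp
theorem pvB_pairs_iff (out_map : List (String × List String)) (src : String)
    (mids : List String) :
    pvB_pairs out_map src mids = true ↔ pvPairProp out_map src mids := by
  induction mids with
  | nil => simp [pvB_pairs, pvPairProp]
  | cons m1 rest ih =>
    cases rest with
    | nil => simp [pvB_pairs, pvPairProp]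
    | cons m2 rest' =>
      rw [pvPairProp, ← ih]
      show (if (m2 :: rest').any
          (fun m' => !(PySem.Set.inter (pvBtgt out_map src m1) (pvBtgt out_map src m')).isEmpty)
          then true else pvB_pairs out_map src (m2 :: rest')) = true ↔ _
      by_cases hany : (m2 :: rest').any
          (fun m' => !(PySem.Set.inter (pvBtgt out_map src m1) (pvBtgt out_map src m')).isEmpty) = true
      · rw [if_pos hany]
        obtain ⟨m', hm', hne⟩ := List.any_eq_true.mp hany
        rw [Bool.not_eq_true', List.isEmpty_eq_false_iff] at hne
        obtain ⟨d, hd⟩ := List.exists_mem_of_ne_nil _ hne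
        rw [PySem.Set.mem_inter, mem_pvBtgt, mem_pvBtgt] at hd
        simp only [true_iff]
        exact Or.inl ⟨m', hm', d, hd.1, hd.2⟩
      · rw [if_neg hany]
        have hno : ∀ m' ∈ (m2 :: rest'), ∀ d,
            ¬ (d ∈ pvFilt out_map src m1 ∧ d ∈ pvFilt out_map src m') := by
          intro m' hm' d hd
          apply hany
          rw [List.any_eq_true]
          refine ⟨m', hm', ?_⟩
          rw [Bool.not_eq_true', List.isEmpty_eq_false_iff]
          intro hnil
          have : d ∈ PySem.Set.inter (pvBtgt out_map src m1) (pvBtgt out_map src m') := by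
            rw [PySem.Set.mem_inter, mem_pvBtgt, mem_pvBtgt]
            exact hd
          rw [hnil] at this
          simp at this
        constructor
        · exact Or.inr
        · rintro (⟨m', hm', d, hd1, hd2⟩ | h)
          · exact absurd ⟨hd1, hd2⟩ (hno m' hm' d)
          · exact h

-- the bridge decides: something already seen is hit, or some pair collides
theorem pvSeen_iff (out_map : List (String × List String)) (src : String)
    (mids : List String) (seen : PySem.Set String) :
    pvSeen out_map src mids seen = true ↔
      (∃ m ∈ mids, ∃ d, d ∈ pvFilt out_map src m ∧ d ∈ seen) ∨
        pvPairProp out_map src mids := by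
  induction mids generalizing seen with
  | nil => simp [pvSeen, pvPairProp]
  | cons m rest ih =>
    rw [hSeq, pvPairProp]
    by_cases hb : (PySem.Set.inter seen (pvFilt out_map src m)).isEmpty = true
    · rw [if_pos hb, ih]
      have hempty : ∀ d, ¬ (d ∈ pvFilt out_map src m ∧ d ∈ seen) := by
        intro d hd
        have : d ∈ PySem.Set.inter seen (pvFilt out_map src m) := by
          rw [PySem.Set.mem_inter]; exact ⟨hd.2, hd.1⟩
        rw [List.isEmpty_iff.mp hb] at this
        simp at this
      constructor
      · rintro (⟨m', hm', d, hd1, hd2⟩ | h)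
        · rw [PySem.Set.mem_update] at hd2
          rcases hd2 with hd2 | hd2
          · exact Or.inl ⟨m', List.mem_cons_of_mem _ hm', d, hd1, hd2⟩
          · exact Or.inr (Or.inl ⟨m', hm', d, hd2, hd1⟩)
        · exact Or.inr (Or.inr h)
      · rintro (⟨m', hm', d, hd1, hd2⟩ | ⟨m', hm', d, hd1, hd2⟩ | h)
        · rcases List.mem_cons.mp hm' with hm1 | hm1
          · exact absurd ⟨hm1 ▸ hd1, hd2⟩ (hempty d)
          · exact Or.inl ⟨m', hm1, d, hd1, by rw [PySem.Set.mem_update]; exact Or.inl hd2⟩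
        · exact Or.inl ⟨m', hm', d, hd2, by rw [PySem.Set.mem_update]; exact Or.inr hd1⟩
        · exact Or.inr h
    · rw [if_neg hb]
      have hne : PySem.Set.inter seen (pvFilt out_map src m) ≠ [] := by
        intro h; exact hb (List.isEmpty_iff.mpr h)
      obtain ⟨d, hd⟩ := List.exists_mem_of_ne_nil _ hne
      rw [PySem.Set.mem_inter] at hd
      simp only [true_iff]
      exact Or.inl ⟨m, List.mem_cons_self, d, hd.2, hd.1⟩

-- per source, from the empty state, A's loop equals B's pairwise loop
theorem pvA_mids_eq_pairs (out_map : List (String × List String)) (src : String)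
    (mids : List String) (hv : ∀ p ∈ out_map, p.2.Nodup) :
    pvA_mids out_map src mids PySem.Dict.empty = pvB_pairs out_map src mids := by
  rw [pvA_mids_eq_seen out_map src mids PySem.Dict.empty PySem.Set.empty hv
    (by intro d; simp [PySem.Dict.getD_empty, PySem.Set.empty])
    (by intro d; simp [PySem.Dict.getD_empty])]
  rw [Bool.eq_iff_iff, pvSeen_iff, pvB_pairs_iff]
  constructor
  · rintro (⟨m, _, d, _, hd⟩ | h)
    · simp [PySem.Set.empty] at hd
    · exact h
  · exact Or.inr

-- B's pairwise loop is false on fewer than two mediators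
theorem pvB_pairs_short (out_map : List (String × List String)) (src : String)
    (mids : List String) (h : mids.length < 2) : pvB_pairs out_map src mids = false := by
  match mids, h with
  | [], _ => rfl
  | [_], _ => rfl

-- the outer loops agree item by item
theorem pvA_items_eq (out_map : List (String × List String))
    (items : List (String × List String))
    (hv : ∀ p ∈ out_map, p.2.Nodup) :
    pvA_items out_map items = items.any (fun p =>
      pvB_pairs out_map p.1 (p.2.filter (fun m => m != p.1))) := by
  induction items with
  | nil => rfl
  | cons q rest ih =>
    obtain ⟨src, tgts⟩ := q
    by_cases hlen : (tgts.filter (fun m => m != src)).length < 2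
    · simp only [pvA_items, List.any_cons, if_pos hlen, ih,
        pvB_pairs_short out_map src _ hlen, Bool.false_or]
    · have hm := pvA_mids_eq_pairs out_map src (tgts.filter (fun m => m != src)) hv
      simp only [pvA_items, List.any_cons, if_neg hlen, ih, hm]
      cases pvB_pairs out_map src (tgts.filter (fun m => m != src)) <;> simp

-- ===== VERDICT (by name: the statement is the Claim_ definition above) =====
theorem any_parallel_mediator_spec : Claim_equal_any_parallel_mediator := by
  intro out_map _ hpre
  unfold Spec_any_parallel_mediator any_parallel_mediator any_parallel_mediator_alt
  exact pvA_items_eq out_map out_map hpre.2.1
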